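-- pv_equiv track=rewrite | github.com/Mitchel-the-Potato/AoC | day19.py | rotate_all
-- ===== SOURCE A (Python) =====
-- def rotate_point_90(p, dim, n=1):
--     if n == 0:
--         return p
--
--     if dim == 0:
--         p2 = (p[0], -p[2], p[1])
--     elif dim == 1:
--         p2 = (-p[2], p[1], p[0])
--     elif dim == 2:
--         p2 = (-p[1], p[0], p[2])
--     else:
--         raise NotImplementedError
--
--     if n == 1:
--         return p2
--     else:
--         assert n > 1
--         return rotate_point_90(p2, dim, n - 1)
--
-- def rotate_beacons(beacon_list, dim, n):
--     return [rotate_point_90(p, dim, n) for p in beacon_list]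
--
-- def rotate_all(bl):
--     rotated = []
--     for nx in range(4):
--         t1 = rotate_beacons(bl, 0, nx)
--         for ny in range(4):
--             t2 = rotate_beacons(t1, 1, ny)
--             for nz in range(4):
--                 t3 = rotate_beacons(t2, 2, nz)
--                 rotated.append((t3, (nx, ny, nz)))
--     return rotated
-- ===== SOURCE B (Python) =====
-- R0 = ((1, 0, 0), (0, 0, -1), (0, 1, 0))
-- R1 = ((0, 0, -1), (0, 1, 0), (1, 0, 0))
-- R2 = ((0, -1, 0), (1, 0, 0), (0, 0, 1))
-- I3 = ((1, 0, 0), (0, 1, 0), (0, 0, 1))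
--
-- def mmul(A, B):
--     return tuple(
--         tuple(A[i][0] * B[0][j] + A[i][1] * B[1][j] + A[i][2] * B[2][j]
--               for j in range(3))
--         for i in range(3))
--
-- def mpow(A, n):
--     M = I3
--     for _ in range(n):
--         M = mmul(A, M)
--     return M
--
-- def mv(M, p):
--     return (M[0][0] * p[0] + M[0][1] * p[1] + M[0][2] * p[2],
--             M[1][0] * p[0] + M[1][1] * p[1] + M[1][2] * p[2],
--             M[2][0] * p[0] + M[2][1] * p[1] + M[2][2] * p[2])
--
-- def rotate_all(bl):
--     return [([mv(M, p) for p in bl], (nx, ny, nz))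
--             for nx in range(4)
--             for ny in range(4)
--             for nz in range(4)
--             for M in [mmul(mpow(R2, nz), mmul(mpow(R1, ny), mpow(R0, nx)))]]
-- ===== Notes on version B (the rewrite author's own statement) =====
-- stated objective: alternative
-- what changed: Instead of re-rotating the whole beacon list per axis in three nested passes, B composes one 3x3 integer rotation matrix per orientation (R2^nz * R1^ny * R0^nx) and maps each point once through it.
import Mathlib
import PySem

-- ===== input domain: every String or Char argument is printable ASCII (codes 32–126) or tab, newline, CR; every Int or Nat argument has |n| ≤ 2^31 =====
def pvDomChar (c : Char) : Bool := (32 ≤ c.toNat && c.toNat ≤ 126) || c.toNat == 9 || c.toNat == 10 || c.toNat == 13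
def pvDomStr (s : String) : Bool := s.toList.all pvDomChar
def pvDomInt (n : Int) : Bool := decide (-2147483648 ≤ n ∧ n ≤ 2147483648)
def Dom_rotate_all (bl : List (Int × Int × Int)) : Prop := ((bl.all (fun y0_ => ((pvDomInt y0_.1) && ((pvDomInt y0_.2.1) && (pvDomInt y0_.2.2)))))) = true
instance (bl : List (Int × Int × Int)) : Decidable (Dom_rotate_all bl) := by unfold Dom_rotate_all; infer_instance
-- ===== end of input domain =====

-- B replaces A's repeated per-axis quarter-turn passes over the point list by one composed
-- rotation matrix per orientation and a single map per orientation (objective: alternative).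

-- ===== PORT A =====
-- rotate_point_90(p, dim, n): n comes from range(4), so it is a Nat here (dim likewise 0/1/2).
def rotate_point_90 (p : Int × Int × Int) (dim : Nat) (n : Nat) : Int × Int × Int :=
  if n = 0 then p
  else
    let p2 : Int × Int × Int :=
      if dim = 0 then (p.1, -p.2.2, p.2.1)
      else if dim = 1 then (-p.2.2, p.2.1, p.1)
      else (-p.2.1, p.1, p.2.2)   -- dim = 2 (the only other value A ever passes)
    if n = 1 then p2 else rotate_point_90 p2 dim (n - 1)
termination_by n
decreasing_by omega

def rotate_beacons (beacon_list : List (Int × Int × Int)) (dim : Nat) (n : Nat) :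
    List (Int × Int × Int) :=
  beacon_list.map (fun p => rotate_point_90 p dim n)

def rotate_all (bl : List (Int × Int × Int)) : List ((List (Int × Int × Int)) × (Int × Int × Int)) :=
  (List.range 4).foldl (fun acc nx =>
    let t1 := rotate_beacons bl 0 nx
    (List.range 4).foldl (fun acc ny =>
      let t2 := rotate_beacons t1 1 ny
      (List.range 4).foldl (fun acc nz =>
        let t3 := rotate_beacons t2 2 nz
        acc ++ [(t3, ((nx : Int), (ny : Int), (nz : Int)))]) acc) acc) []

-- ===== PORT B =====
def Mat3 : Type := (Int × Int × Int) × (Int × Int × Int) × (Int × Int × Int)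

def bR0 : Mat3 := ((1, 0, 0), (0, 0, -1), (0, 1, 0))
def bR1 : Mat3 := ((0, 0, -1), (0, 1, 0), (1, 0, 0))
def bR2 : Mat3 := ((0, -1, 0), (1, 0, 0), (0, 0, 1))
def bI3 : Mat3 := ((1, 0, 0), (0, 1, 0), (0, 0, 1))

def mmul (A B : Mat3) : Mat3 :=
  ((A.1.1 * B.1.1 + A.1.2.1 * B.2.1.1 + A.1.2.2 * B.2.2.1,
    A.1.1 * B.1.2.1 + A.1.2.1 * B.2.1.2.1 + A.1.2.2 * B.2.2.2.1,
    A.1.1 * B.1.2.2 + A.1.2.1 * B.2.1.2.2 + A.1.2.2 * B.2.2.2.2),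
   (A.2.1.1 * B.1.1 + A.2.1.2.1 * B.2.1.1 + A.2.1.2.2 * B.2.2.1,
    A.2.1.1 * B.1.2.1 + A.2.1.2.1 * B.2.1.2.1 + A.2.1.2.2 * B.2.2.2.1,
    A.2.1.1 * B.1.2.2 + A.2.1.2.1 * B.2.1.2.2 + A.2.1.2.2 * B.2.2.2.2),
   (A.2.2.1 * B.1.1 + A.2.2.2.1 * B.2.1.1 + A.2.2.2.2 * B.2.2.1,
    A.2.2.1 * B.1.2.1 + A.2.2.2.1 * B.2.1.2.1 + A.2.2.2.2 * B.2.2.2.1,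
    A.2.2.1 * B.1.2.2 + A.2.2.2.1 * B.2.1.2.2 + A.2.2.2.2 * B.2.2.2.2))

def mpow (A : Mat3) (n : Nat) : Mat3 :=
  (List.range n).foldl (fun M _ => mmul A M) bI3

def mv (M : Mat3) (p : Int × Int × Int) : Int × Int × Int :=
  (M.1.1 * p.1 + M.1.2.1 * p.2.1 + M.1.2.2 * p.2.2,
   M.2.1.1 * p.1 + M.2.1.2.1 * p.2.1 + M.2.1.2.2 * p.2.2,
   M.2.2.1 * p.1 + M.2.2.2.1 * p.2.1 + M.2.2.2.2 * p.2.2)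

def rotate_all_alt (bl : List (Int × Int × Int)) : List ((List (Int × Int × Int)) × (Int × Int × Int)) :=
  (List.range 4).flatMap (fun nx =>
    (List.range 4).flatMap (fun ny =>
      (List.range 4).map (fun nz =>
        let M := mmul (mpow bR2 nz) (mmul (mpow bR1 ny) (mpow bR0 nx))
        (bl.map (fun p => mv M p), ((nx : Int), (ny : Int), (nz : Int))))))

-- ===== PRECONDITION & SPEC =====
def Spec_rotate_all (bl : List (Int × Int × Int)) (out : List ((List (Int × Int × Int)) × (Int × Int × Int))) : Prop := out = rotate_all_alt bl
instance (bl : List (Int × Int × Int)) (out : List ((List (Int × Int × Int)) × (Int × Int × Int))) : Decidable (Spec_rotate_all bl out) := by unfold Spec_rotate_all; infer_instance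

-- ===== CLAIM (what is proved, stated in full; the proofs are below) =====
def Claim_equal_rotate_all : Prop := ∀ (bl : List (Int × Int × Int)), Dom_rotate_all bl → Spec_rotate_all bl (rotate_all bl)

-- ===== LEMMAS AND PROOFS =====

-- matrix–vector application turns matrix product into composition
theorem mv_mmul (A B : Mat3) (p : Int × Int × Int) :
    mv (mmul A B) p = mv A (mv B p) := by
  obtain ⟨a, b, c⟩ := p
  simp only [mv, mmul, Prod.ext_iff]
  and_intros <;> ring

-- one axis: A's repeated quarter-turn equals B's matrix power, for n < 4
theorem axis0_eq (n : Nat) (hn : n < 4) (p : Int × Int × Int) :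
    rotate_point_90 p 0 n = mv (mpow bR0 n) p := by
  obtain ⟨a, b, c⟩ := p
  interval_cases n <;> simp [rotate_point_90, mv, mpow, bR0, bI3, List.range_succ, mmul]

theorem axis1_eq (n : Nat) (hn : n < 4) (p : Int × Int × Int) :
    rotate_point_90 p 1 n = mv (mpow bR1 n) p := by
  obtain ⟨a, b, c⟩ := p
  interval_cases n <;> simp [rotate_point_90, mv, mpow, bR1, bI3, List.range_succ, mmul]

theorem axis2_eq (n : Nat) (hn : n < 4) (p : Int × Int × Int) :
    rotate_point_90 p 2 n = mv (mpow bR2 n) p := by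
  obtain ⟨a, b, c⟩ := p
  interval_cases n <;> simp [rotate_point_90, mv, mpow, bR2, bI3, List.range_succ, mmul]

-- the per-point agreement for each of the 64 orientations
theorem point_eq (nx ny nz : Nat) (hx : nx < 4) (hy : ny < 4) (hz : nz < 4)
    (p : Int × Int × Int) :
    rotate_point_90 (rotate_point_90 (rotate_point_90 p 0 nx) 1 ny) 2 nz =
      mv (mmul (mpow bR2 nz) (mmul (mpow bR1 ny) (mpow bR0 nx))) p := by
  rw [mv_mmul, mv_mmul, axis0_eq nx hx, axis1_eq ny hy, axis2_eq nz hz]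

-- ===== VERDICT (by name: the statement is the Claim_ definition above) =====
theorem rotate_all_spec : Claim_equal_rotate_all := by
  intro bl _
  show rotate_all bl = rotate_all_alt bl
  unfold rotate_all rotate_all_alt
  simp only [PySem.List.foldl_append_singleton_eq_map, PySem.List.foldl_append_eq_flatMap,
    List.nil_append]
  refine List.flatMap_congr fun nx hx => ?_
  refine List.flatMap_congr fun ny hy => ?_
  refine List.map_congr_left fun nz hz => ?_
  rw [List.mem_range] at hx hy hz
  refine Prod.ext ?_ rfl
  simp only [rotate_beacons, List.map_map]
  exact List.map_congr_left fun p _ => point_eq nx ny nz hx hy hz p
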